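-- pv_equiv track=rewrite | github.com/alphatra/CPC-SNN-GW | scripts/create_ood_splits.py | split_by_run
-- ===== SOURCE A (Python) =====
-- from typing import Dict, Iterable, List, Tuple
--
-- def numeric_or_lex_key(v: str):
--     return (0, int(v)) if v.isdigit() else (1, v)
--
-- def split_by_run(ids: List[str], run_map: Dict[str, str], train_runs: Iterable[str], test_runs: Iterable[str]) -> Tuple[List[str], List[str]]:
--     train_set = set(train_runs)
--     test_set = set(test_runs)
--     train_ids: List[str] = []
--     test_ids: List[str] = []
--     for sid in ids:
--         run = run_map.get(str(sid))
--         if run in train_set: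
--             train_ids.append(str(sid))
--         elif run in test_set:
--             test_ids.append(str(sid))
--     train_ids.sort(key=numeric_or_lex_key)
--     test_ids.sort(key=numeric_or_lex_key)
--     return train_ids, test_ids
-- ===== SOURCE B (Python) =====
-- from typing import Dict, Iterable, List, Tuple
--
-- def numeric_or_lex_key(v: str):
--     return (0, int(v)) if v.isdigit() else (1, v)
--
-- def split_by_run(ids: List[str], run_map: Dict[str, str], train_runs: Iterable[str], test_runs: Iterable[str]) -> Tuple[List[str], List[str]]:
--     # Sort once up front, then select each side with a single filter pass;
--     # sort stability makes the per-list order identical to partition-then-sort.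
--     train_set = set(train_runs)
--     test_set = set(test_runs)
--     srt = sorted((str(s) for s in ids), key=numeric_or_lex_key)
--     train_ids = [sid for sid in srt if run_map.get(sid) in train_set]
--     test_ids = [sid for sid in srt
--                 if run_map.get(sid) not in train_set and run_map.get(sid) in test_set]
--     return train_ids, test_ids
-- ===== Notes on version B (the rewrite author's own statement) =====
-- stated objective: alternative
-- what changed: A partitions ids into two lists in one loop and then sorts each list; B sorts the ids once up front and then selects each side with a filter pass, relying on sort stability for identical per-list order.
import Mathlib
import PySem

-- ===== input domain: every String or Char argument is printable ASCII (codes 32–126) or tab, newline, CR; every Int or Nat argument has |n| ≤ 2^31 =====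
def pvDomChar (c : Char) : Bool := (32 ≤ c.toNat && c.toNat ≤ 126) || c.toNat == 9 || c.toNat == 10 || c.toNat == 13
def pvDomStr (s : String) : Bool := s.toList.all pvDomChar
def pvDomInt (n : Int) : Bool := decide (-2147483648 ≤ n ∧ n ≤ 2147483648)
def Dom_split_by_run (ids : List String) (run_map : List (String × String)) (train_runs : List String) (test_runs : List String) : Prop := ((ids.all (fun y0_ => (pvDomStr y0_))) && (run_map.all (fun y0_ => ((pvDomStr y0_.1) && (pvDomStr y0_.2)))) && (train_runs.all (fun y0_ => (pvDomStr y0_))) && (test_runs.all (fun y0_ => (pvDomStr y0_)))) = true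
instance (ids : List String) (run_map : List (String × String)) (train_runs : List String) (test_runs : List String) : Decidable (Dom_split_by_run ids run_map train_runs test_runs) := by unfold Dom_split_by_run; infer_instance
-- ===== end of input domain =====

-- B sorts the ids once up front and then selects each side with a filter pass (vs A's
-- partition-loop followed by two sorts); same asymptotic cost, different decomposition.

-- ===== PORT A =====
-- numeric_or_lex_key(v) = (0, int(v)) if v.isdigit() else (1, v).  The Python tuple key is
-- encoded as Lex (Int ⊕ String): inl < inr matches (0,_) < (1,_), and within a branch the
-- order is the Int / code-point String order, exactly as in Python.  v.isdigit() guarantees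
-- int(v) succeeds, so the `.getD 0` fallback of PySem.Int.ofStr? is never taken.
def numeric_or_lex_key (v : String) : Lex (Int ⊕ String) :=
  if PySem.Str.strIsdigit v then toLex (Sum.inl ((PySem.Int.ofStr? v).getD 0))
  else toLex (Sum.inr v)

def split_by_run (ids : List String) (run_map : List (String × String)) (train_runs : List String) (test_runs : List String) : List String × List String :=
  let train_set : PySem.Set String := PySem.Set.ofList train_runs
  let test_set : PySem.Set String := PySem.Set.ofList test_runs
  -- for sid in ids: run = run_map.get(str(sid)); if run in train_set … elif run in test_set …
  -- (str(sid) is sid: the ids are strings; `None in train_set` is False: the none branch)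
  let p := ids.foldl (fun (acc : List String × List String) sid =>
    match PySem.Dict.get? (PySem.Dict.mk run_map) sid with
    | some run =>
      if PySem.Set.contains train_set run then (acc.1 ++ [sid], acc.2)
      else if PySem.Set.contains test_set run then (acc.1, acc.2 ++ [sid])
      else acc
    | none => acc) ([], [])
  (PySem.List.sorted p.1 numeric_or_lex_key false, PySem.List.sorted p.2 numeric_or_lex_key false)

-- ===== PORT B =====
def split_by_run_alt (ids : List String) (run_map : List (String × String)) (train_runs : List String) (test_runs : List String) : List String × List String :=
  let train_set : PySem.Set String := PySem.Set.ofList train_runs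
  let test_set : PySem.Set String := PySem.Set.ofList test_runs
  let srt := PySem.List.sorted ids numeric_or_lex_key false
  -- [sid for sid in srt if run_map.get(sid) in train_set]
  let train_ids := srt.filter (fun sid =>
    match PySem.Dict.get? (PySem.Dict.mk run_map) sid with
    | some run => PySem.Set.contains train_set run
    | none => false)
  -- [sid for sid in srt if run_map.get(sid) not in train_set and run_map.get(sid) in test_set]
  let test_ids := srt.filter (fun sid =>
    match PySem.Dict.get? (PySem.Dict.mk run_map) sid with
    | some run => !PySem.Set.contains train_set run && PySem.Set.contains test_set run
    | none => false)
  (train_ids, test_ids)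

-- ===== PRECONDITION & SPEC =====
def Spec_split_by_run (ids : List String) (run_map : List (String × String)) (train_runs : List String) (test_runs : List String) (out : List String × List String) : Prop := out = split_by_run_alt ids run_map train_runs test_runs
instance (ids : List String) (run_map : List (String × String)) (train_runs : List String) (test_runs : List String) (out : List String × List String) : Decidable (Spec_split_by_run ids run_map train_runs test_runs out) := by unfold Spec_split_by_run; infer_instance

-- ===== CLAIM (what is proved, stated in full; the proofs are below) =====
def Claim_equal_split_by_run : Prop := ∀ (ids : List String) (run_map : List (String × String)) (train_runs : List String) (test_runs : List String), Dom_split_by_run ids run_map train_runs test_runs → Spec_split_by_run ids run_map train_runs test_runs (split_by_run ids run_map train_runs test_runs)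

-- ===== LEMMAS AND PROOFS =====

-- insertBy puts x in front when it goes before every element (only the head is inspected).
theorem insertBy_eq_cons {α : Type} (bef : α → α → Bool) (x : α) (l : List α)
    (h : ∀ z ∈ l, bef x z = true) :
    PySem.List.insertBy bef x l = x :: l := by
  cases l with
  | nil => rfl
  | cons z t => simp [PySem.List.insertBy, h z (by simp)]

-- insertBy with the key comparison preserves key-sortedness of the accumulator.
theorem pairwise_insertBy {α κ : Type} [LinearOrder κ] (key : α → κ) (x : α) (acc : List α)
    (h : acc.Pairwise (fun a b => key a ≤ key b)) :
    (PySem.List.insertBy (fun a b => decide (key a < key b)) x acc).Pairwise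
      (fun a b => key a ≤ key b) := by
  induction acc with
  | nil => simp [PySem.List.insertBy]
  | cons y ys ih =>
    rcases List.pairwise_cons.mp h with ⟨hy, hys⟩
    by_cases hb : key x < key y
    · simp only [PySem.List.insertBy, hb, decide_true, if_true]
      refine List.pairwise_cons.mpr ⟨?_, h⟩
      intro z hz
      rcases List.mem_cons.mp hz with rfl | hz
      · exact le_of_lt hb
      · exact le_of_lt (lt_of_lt_of_le hb (hy z hz))
    · simp only [PySem.List.insertBy, hb, decide_false]
      refine List.pairwise_cons.mpr ⟨?_, ih hys⟩
      intro z hz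
      rcases (PySem.List.mem_insertBy _ _ _ _).mp hz with rfl | hz
      · exact le_of_not_gt hb
      · exact hy z hz

-- filtering commutes with a single insertion into a key-sorted accumulator.
theorem filter_insertBy {α κ : Type} [LinearOrder κ] (key : α → κ) (p : α → Bool) (x : α)
    (acc : List α) (h : acc.Pairwise (fun a b => key a ≤ key b)) :
    (PySem.List.insertBy (fun a b => decide (key a < key b)) x acc).filter p =
      if p x then PySem.List.insertBy (fun a b => decide (key a < key b)) x (acc.filter p)
      else acc.filter p := by
  induction acc with
  | nil => cases hp : p x <;> simp [PySem.List.insertBy, hp]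
  | cons y ys ih =>
    rcases List.pairwise_cons.mp h with ⟨hy, hys⟩
    by_cases hb : key x < key y
    · simp only [PySem.List.insertBy, hb, decide_true, if_true]
      cases hp : p x with
      | false => simp [hp]
      | true =>
        have hfront : PySem.List.insertBy (fun a b => decide (key a < key b)) x
            ((y :: ys).filter p) = x :: (y :: ys).filter p := by
          refine insertBy_eq_cons _ _ _ ?_
          intro z hz
          have hz' : z ∈ y :: ys := List.mem_of_mem_filter hz
          rcases List.mem_cons.mp hz' with rfl | hz'
          · simpa using hb
          · simpa using lt_of_lt_of_le hb (hy z hz')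
        rw [hfront]; simp [hp]
    · simp only [PySem.List.insertBy, hb, decide_false]
      cases hp : p x with
      | false =>
        cases hpy : p y <;> simp [hpy] <;>
          simpa [hp] using ih hys
      | true =>
        cases hpy : p y <;>
          simp [hpy, PySem.List.insertBy, hb] <;>
          simpa [hp] using ih hys

-- filtering commutes with the whole insertion-sort fold from a sorted accumulator.
theorem filter_foldl_insertBy {α κ : Type} [LinearOrder κ] (key : α → κ) (p : α → Bool)
    (xs : List α) :
    ∀ acc : List α, acc.Pairwise (fun a b => key a ≤ key b) →
      (xs.foldl (fun acc x => PySem.List.insertBy (fun a b => decide (key a < key b)) x acc) acc).filter p =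
        (xs.filter p).foldl (fun acc x => PySem.List.insertBy (fun a b => decide (key a < key b)) x acc) (acc.filter p) := by
  induction xs with
  | nil => intro acc _; simp
  | cons x xs ih =>
    intro acc hacc
    have hstep := ih (PySem.List.insertBy (fun a b => decide (key a < key b)) x acc)
      (pairwise_insertBy key x acc hacc)
    cases hp : p x with
    | false =>
      simp only [List.foldl_cons, List.filter_cons, hp]
      rw [hstep, filter_insertBy key p x acc hacc, hp, if_neg (by simp)]; simp
    | true =>
      simp only [List.foldl_cons, List.filter_cons, hp]
      rw [hstep, filter_insertBy key p x acc hacc, hp, if_pos rfl]; simp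

-- filter after a stable sort = stable sort of the filtered list.
theorem filter_sorted {α κ : Type} [LinearOrder κ] (key : α → κ) (p : α → Bool) (xs : List α) :
    (PySem.List.sorted xs key false).filter p = PySem.List.sorted (xs.filter p) key false := by
  rw [PySem.List.sorted_eq_foldl_insertBy, PySem.List.sorted_eq_foldl_insertBy]
  simpa using filter_foldl_insertBy key p xs [] (by simp)

-- A's partition loop is the pair of filters of ids by the two dispatch predicates.
theorem partition_loop_eq_filters (ids : List String) (run_map : List (String × String))
    (train_runs test_runs : List String) :
    ids.foldl (fun (acc : List String × List String) sid =>
      match PySem.Dict.get? (PySem.Dict.mk run_map) sid with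
      | some run =>
        if PySem.Set.contains (PySem.Set.ofList train_runs) run then (acc.1 ++ [sid], acc.2)
        else if PySem.Set.contains (PySem.Set.ofList test_runs) run then (acc.1, acc.2 ++ [sid])
        else acc
      | none => acc) ([], []) =
    (ids.filter (fun sid =>
        match PySem.Dict.get? (PySem.Dict.mk run_map) sid with
        | some run => PySem.Set.contains (PySem.Set.ofList train_runs) run
        | none => false),
     ids.filter (fun sid =>
        match PySem.Dict.get? (PySem.Dict.mk run_map) sid with
        | some run => !PySem.Set.contains (PySem.Set.ofList train_runs) run &&
                      PySem.Set.contains (PySem.Set.ofList test_runs) run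
        | none => false)) := by
  have hbody : ∀ (acc : List String × List String) (sid : String),
      (match PySem.Dict.get? (PySem.Dict.mk run_map) sid with
      | some run =>
        if PySem.Set.contains (PySem.Set.ofList train_runs) run then (acc.1 ++ [sid], acc.2)
        else if PySem.Set.contains (PySem.Set.ofList test_runs) run then (acc.1, acc.2 ++ [sid])
        else acc
      | none => acc) =
      ((if (match PySem.Dict.get? (PySem.Dict.mk run_map) sid with
            | some run => PySem.Set.contains (PySem.Set.ofList train_runs) run
            | none => false) then acc.1 ++ [sid] else acc.1),
       (if (match PySem.Dict.get? (PySem.Dict.mk run_map) sid with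
            | some run => !PySem.Set.contains (PySem.Set.ofList train_runs) run &&
                          PySem.Set.contains (PySem.Set.ofList test_runs) run
            | none => false) then acc.2 ++ [sid] else acc.2)) := by
    intro acc sid
    cases hg : PySem.Dict.get? (PySem.Dict.mk run_map) sid with
    | none => simp
    | some run =>
      cases htr : PySem.Set.contains (PySem.Set.ofList train_runs) run with
      | true =>
        have h1 : run ∈ train_runs := by simpa using htr
        simp [h1]
      | false =>
        have h1 : run ∉ train_runs := by simpa using htr
        cases hte : PySem.Set.contains (PySem.Set.ofList test_runs) run with
        | true =>
          have h2 : run ∈ test_runs := by simpa using hte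
          simp [h1, h2]
        | false =>
          have h2 : run ∉ test_runs := by simpa using hte
          simp [h1, h2]
  refine Eq.trans (PySem.List.foldl_congr_mem ids _ _ (([], []) : List String × List String)
    (fun acc x _ => hbody acc x)) ?_
  refine Eq.trans (PySem.List.foldl_prod_mk
    (f := fun (acc : List String) sid =>
      if (match PySem.Dict.get? (PySem.Dict.mk run_map) sid with
          | some run => PySem.Set.contains (PySem.Set.ofList train_runs) run
          | none => false) then acc ++ [sid] else acc)
    (g := fun (acc : List String) sid =>
      if (match PySem.Dict.get? (PySem.Dict.mk run_map) sid with
          | some run => !PySem.Set.contains (PySem.Set.ofList train_runs) run &&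
                        PySem.Set.contains (PySem.Set.ofList test_runs) run
          | none => false) then acc ++ [sid] else acc) ids [] []) ?_
  rw [PySem.List.foldl_append_if_eq_filter, PySem.List.foldl_append_if_eq_filter]
  simp

-- ===== VERDICT (by name: the statement is the Claim_ definition above) =====
theorem split_by_run_spec : Claim_equal_split_by_run := by
  intro ids run_map train_runs test_runs _
  unfold Spec_split_by_run split_by_run split_by_run_alt
  simp only [partition_loop_eq_filters]
  rw [← filter_sorted, ← filter_sorted]
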